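-- pv_equiv track=rewrite | github.com/jogiking/Algorithm | LeetCode/2012.py | sumOfBeauties
-- ===== SOURCE A (Python) =====
-- from typing import List
--
-- def sumOfBeauties(nums: List[int]) -> int:
--     ans = 0
--     length = len(nums)
--
--     minArr = [0]*len(nums)
--     minArr[-1] = nums[-1]
--
--     for i in reversed(range(length-1)):
--         minArr[i] = min(nums[i], minArr[i+1])
--
--     maxValue = nums[0]
--     for i in range(1, length-1):
--         if maxValue < nums[i] < minArr[i+1]:
--             ans += 2
--         elif nums[i-1] < nums[i] < nums[i+1]:
--             ans += 1
--         maxValue = max(nums[i], maxValue)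
--
--     return ans
-- ===== SOURCE B (Python) =====
-- def sumOfBeauties(nums):
--     ans = 0
--     for i in range(1, len(nums) - 1):
--         if max(nums[:i]) < nums[i] < min(nums[i+1:]):
--             ans += 2
--         elif nums[i-1] < nums[i] < nums[i+1]:
--             ans += 1
--     return ans
-- ===== Notes on version B (the rewrite author's own statement) =====
-- stated objective: simpler
-- what changed: Drops A's precomputed suffix-min array and running-max accumulator entirely: B is a direct per-index check that computes max(nums[:i]) and min(nums[i+1:]) from slices on the spot, trading A's O(n) two-pass scheme for a plainly readable O(n^2) brute force.
import Mathlib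
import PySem

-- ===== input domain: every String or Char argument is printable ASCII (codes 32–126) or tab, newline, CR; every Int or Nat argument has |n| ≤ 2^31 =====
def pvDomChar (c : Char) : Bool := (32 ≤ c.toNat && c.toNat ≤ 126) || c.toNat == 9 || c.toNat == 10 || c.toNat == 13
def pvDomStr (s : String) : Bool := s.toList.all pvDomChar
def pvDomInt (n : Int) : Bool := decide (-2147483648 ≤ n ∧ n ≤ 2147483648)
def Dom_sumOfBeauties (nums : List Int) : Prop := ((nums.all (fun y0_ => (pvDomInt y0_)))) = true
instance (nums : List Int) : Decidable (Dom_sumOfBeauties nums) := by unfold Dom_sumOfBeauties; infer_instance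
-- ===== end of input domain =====

-- B drops A's precomputed suffix-min array and running-max accumulator and instead checks each
-- index directly against max(nums[:i]) and min(nums[i+1:]) computed from slices (objective: simpler; O(n^2) vs A's O(n)).

-- ===== PORT A =====
def sumOfBeauties (nums : List Int) : Int :=
  let length : Int := (nums.length : Int)
  let minArr : List Int := PySem.List.pyRepeat [(0 : Int)] length
  let minArr := PySem.List.pySetD minArr (-1) (PySem.List.pyGetD nums (-1) 0)
  let minArr := ((PySem.List.pyRange 0 (length - 1) 1).reverse).foldl
    (fun m i => PySem.List.pySetD m i
      (min (PySem.List.pyGetD nums i 0) (PySem.List.pyGetD m (i + 1) 0))) minArr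
  let st := (PySem.List.pyRange 1 (length - 1) 1).foldl
    (fun (s : Int × Int) i =>
      let ans :=
        if s.2 < PySem.List.pyGetD nums i 0 ∧
            PySem.List.pyGetD nums i 0 < PySem.List.pyGetD minArr (i + 1) 0 then s.1 + 2
        else if PySem.List.pyGetD nums (i - 1) 0 < PySem.List.pyGetD nums i 0 ∧
            PySem.List.pyGetD nums i 0 < PySem.List.pyGetD nums (i + 1) 0 then s.1 + 1
        else s.1
      (ans, max (PySem.List.pyGetD nums i 0) s.2))
    ((0 : Int), PySem.List.pyGetD nums 0 0)
  st.1

-- ===== PORT B =====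
-- max(nums[:i]) / min(nums[i+1:]) are ported as PySem.List.max?/min? with .getD 0; inside the
-- loop 1 ≤ i ≤ len-2, so both slices are nonempty and the default is never used (exact there).
def sumOfBeauties_alt (nums : List Int) : Int :=
  (PySem.List.pyRange 1 ((nums.length : Int) - 1) 1).foldl
    (fun ans i =>
      if (PySem.List.max? (PySem.List.slice nums none (some i)) (fun y => y)).getD 0 <
            PySem.List.pyGetD nums i 0 ∧
          PySem.List.pyGetD nums i 0 <
            (PySem.List.min? (PySem.List.slice nums (some (i + 1)) none) (fun y => y)).getD 0
      then ans + 2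
      else if PySem.List.pyGetD nums (i - 1) 0 < PySem.List.pyGetD nums i 0 ∧
          PySem.List.pyGetD nums i 0 < PySem.List.pyGetD nums (i + 1) 0
      then ans + 1
      else ans) 0

-- ===== PRECONDITION & SPEC =====
-- Pre_ excludes only the empty list, on which A raises IndexError reading the last element.
def Pre_sumOfBeauties (nums : List Int) : Prop := nums ≠ []
instance (nums : List Int) : Decidable (Pre_sumOfBeauties nums) := by
  unfold Pre_sumOfBeauties; infer_instance
def pvWitness_sumOfBeauties : List Int := [1, 3, 2]

def Spec_sumOfBeauties (nums : List Int) (out : Int) : Prop := out = sumOfBeauties_alt nums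
instance (nums : List Int) (out : Int) : Decidable (Spec_sumOfBeauties nums out) := by
  unfold Spec_sumOfBeauties; infer_instance

-- ===== CLAIM (what is proved, stated in full; the proofs are below) =====
def Claim_equal_sumOfBeauties : Prop := ∀ (nums : List Int), Dom_sumOfBeauties nums →
  Pre_sumOfBeauties nums → Spec_sumOfBeauties nums (sumOfBeauties nums)
-- ===== LEMMAS AND PROOFS =====

-- min of the suffix nums[j:] and max of the prefix nums[:i], as Python's min/max compute them.
def sufMin (nums : List Int) (j : Nat) : Int :=
  match nums.drop j with
  | [] => 0
  | x :: t => t.foldl min x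

def preMax (nums : List Int) (i : Nat) : Int :=
  match nums.take i with
  | [] => 0
  | x :: t => t.foldl max x

theorem foldl_min_min (t : List Int) : ∀ a b : Int,
    t.foldl min (min a b) = min a (t.foldl min b) := by
  induction t with
  | nil => intro a b; simp
  | cons c u ih =>
    intro a b
    simp only [List.foldl_cons, min_assoc]
    exact ih a (min b c)

theorem drop_length_sub_one {α : Type} (l : List α) (h : l ≠ []) :
    l.drop (l.length - 1) = [l.getLast h] := by
  induction l with
  | nil => exact absurd rfl h
  | cons x t ih =>
    cases t with
    | nil => rfl
    | cons y u =>
      have : (x :: y :: u).length - 1 = (y :: u).length - 1 + 1 := by simp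
      rw [this, List.drop_succ_cons, ih (by simp)]
      rfl

theorem sufMin_last (nums : List Int) (h : nums ≠ []) :
    sufMin nums (nums.length - 1) = nums.getLast h := by
  unfold sufMin
  rw [drop_length_sub_one nums h]
  simp

theorem sufMin_rec (nums : List Int) (j : Nat) (hj : j + 1 < nums.length) :
    sufMin nums j = min (nums.getD j 0) (sufMin nums (j + 1)) := by
  unfold sufMin
  have hjlt : j < nums.length := by omega
  rw [List.drop_eq_getElem_cons hjlt]
  cases hd : nums.drop (j + 1) with
  | nil => have := List.length_drop (l := nums) (i := j + 1); rw [hd] at this; simp at this; omega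
  | cons y u =>
    simp only [List.foldl_cons]
    rw [foldl_min_min, List.getD_eq_getElem nums 0 hjlt]

theorem preMax_succ (nums : List Int) (a : Nat) (ha : 1 ≤ a) (han : a < nums.length) :
    preMax nums (a + 1) = max (preMax nums a) (nums.getD a 0) := by
  unfold preMax
  have htake : nums.take (a + 1) = nums.take a ++ [nums.getD a 0] := by
    rw [List.take_add_one, List.getElem?_eq_getElem han, List.getD_eq_getElem nums 0 han]
    rfl
  cases hc : nums.take a with
  | nil =>
    exfalso
    have h0 : (nums.take a).length = 0 := by rw [hc]; rfl
    rw [List.length_take] at h0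
    omega
  | cons x t =>
    rw [htake, hc]
    simp only [List.cons_append, List.foldl_append, List.foldl_cons, List.foldl_nil]

theorem preMax_one (x : Int) (t : List Int) : preMax (x :: t) 1 = x := by
  unfold preMax; rfl

-- B's slice-max: max(nums[:a]).getD 0 = preMax nums a on the loop's range.
theorem maxSlice_eq (nums : List Int) (a : Nat) (ha : 1 ≤ a) (han : a ≤ nums.length) :
    (PySem.List.max? (PySem.List.slice nums none (some ((a : Nat) : Int))) (fun y => y)).getD 0
      = preMax nums a := by
  rw [PySem.List.slice_to_natCast]
  cases hc : nums.take a with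
  | nil =>
    exfalso
    have h0 : (nums.take a).length = 0 := by rw [hc]; rfl
    rw [List.length_take] at h0
    omega
  | cons x t =>
    rw [PySem.List.max?_id_cons]
    unfold preMax
    rw [hc]
    simp

-- B's slice-min: min(nums[a:]).getD 0 = sufMin nums a when the suffix is nonempty.
theorem minSlice_eq (nums : List Int) (a : Nat) (han : a < nums.length) :
    (PySem.List.min? (PySem.List.slice nums (some ((a : Nat) : Int)) none) (fun y => y)).getD 0
      = sufMin nums a := by
  rw [PySem.List.slice_from_natCast]
  cases hc : nums.drop a with
  | nil =>
    have := List.length_drop (l := nums) (i := a); rw [hc] at this; simp at this; omega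
  | cons x t =>
    rw [PySem.List.min?_id_cons]
    unfold sufMin
    rw [hc]
    simp

theorem pySetD_neg_one (xs : List Int) (v : Int) (h : xs ≠ []) :
    PySem.List.pySetD xs (-1) v = xs.set (xs.length - 1) v := by
  have hn : 1 ≤ xs.length := List.length_pos_iff.mpr h
  simp [PySem.List.pySetD, PySem.List.pySet?, PySem.List.pyIdx?, hn]

theorem getD_set_ne (l : List Int) (c j : Nat) (v : Int) (h : c ≠ j) :
    (l.set c v).getD j 0 = l.getD j 0 := by
  simp [List.getD_eq_getElem?_getD, List.getElem?_set_ne h]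

theorem getD_set_self (l : List Int) (c : Nat) (v : Int) (h : c < l.length) :
    (l.set c v).getD c 0 = v := by
  simp [List.getD_eq_getElem?_getD, h]

-- A's backward minArr loop yields exactly a list M satisfying the min recurrence.
theorem minArr_loop (nums : List Int) (M : List Int)
    (hMrec : ∀ j, j + 1 < nums.length →
      M.getD j 0 = min (nums.getD j 0) (M.getD (j+1) 0))
    (hMlen : M.length = nums.length) :
    ∀ (c : Nat), c ≤ nums.length - 1 → ∀ (m : List Int), m.length = nums.length →
    (∀ j, c ≤ j → j < nums.length → m.getD j 0 = M.getD j 0) →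
    ((PySem.List.pyRange 0 (c : Int) 1).reverse).foldl
      (fun m i => PySem.List.pySetD m i
        (min (PySem.List.pyGetD nums i 0) (PySem.List.pyGetD m (i + 1) 0))) m = M := by
  intro c
  induction c with
  | zero =>
    intro _ m hlen hagree
    simp only [Nat.cast_zero, PySem.List.pyRange_one_eq_nil (le_refl 0), List.reverse_nil,
      List.foldl_nil]
    apply List.ext_getElem (by omega)
    intro i h1 h2
    rw [← List.getD_eq_getElem m 0 h1, ← List.getD_eq_getElem M 0 h2]
    exact hagree i (Nat.zero_le i) (by omega)
  | succ c ih =>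
    intro hc m hlen hagree
    have hcast : ((c + 1 : Nat) : Int) = (c : Int) + 1 := by push_cast; ring
    rw [hcast, PySem.List.pyRange_one_succ_right (by positivity), List.reverse_append]
    simp only [List.reverse_cons, List.reverse_nil, List.nil_append, List.singleton_append,
      List.foldl_cons]
    have hcn : c + 1 < nums.length := by omega
    have hget1 : PySem.List.pyGetD m ((c : Int) + 1) 0 = M.getD (c+1) 0 := by
      have : ((c : Int) + 1) = ((c + 1 : Nat) : Int) := by push_cast; ring
      rw [this, PySem.List.pyGetD_natCast]
      exact hagree (c+1) (le_refl _) hcn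
    have hgetn : PySem.List.pyGetD nums (c : Int) 0 = nums.getD c 0 :=
      PySem.List.pyGetD_natCast ..
    have hset : PySem.List.pySetD m (c : Int)
        (min (PySem.List.pyGetD nums (c : Int) 0) (PySem.List.pyGetD m ((c : Int) + 1) 0))
        = m.set c (M.getD c 0) := by
      rw [PySem.List.pySetD_natCast, hget1, hgetn, ← hMrec c hcn]
    rw [hset]
    apply ih (by omega) _ (by simpa using hlen)
    intro j hcj hjn
    by_cases hjc : j = c
    · subst hjc
      exact getD_set_self m j _ (by omega)
    · rw [getD_set_ne m c j _ (fun e => hjc e.symm)]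
      exact hagree j (by omega) hjn

-- The two main loops agree: A's running maxValue equals preMax, A's minArr lookups equal sufMin,
-- which are exactly what B's slice max/min compute.
theorem main_loop (nums M : List Int)
    (hM : ∀ j, j < nums.length → M.getD j 0 = sufMin nums j) (b : Int)
    (hb : b = (nums.length : Int) - 1) :
    ∀ (d : Nat) (a : Nat), 1 ≤ a → ((nums.length : Int) - 1 - (a : Int)) ≤ (d : Int) →
    ∀ (ans maxv : Int), maxv = preMax nums a →
    ((PySem.List.pyRange (a : Int) b 1).foldl
      (fun (s : Int × Int) i =>
        let ans :=
          if s.2 < PySem.List.pyGetD nums i 0 ∧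
              PySem.List.pyGetD nums i 0 < PySem.List.pyGetD M (i + 1) 0 then s.1 + 2
          else if PySem.List.pyGetD nums (i - 1) 0 < PySem.List.pyGetD nums i 0 ∧
              PySem.List.pyGetD nums i 0 < PySem.List.pyGetD nums (i + 1) 0 then s.1 + 1
          else s.1
        (ans, max (PySem.List.pyGetD nums i 0) s.2)) (ans, maxv)).1
    = (PySem.List.pyRange (a : Int) b 1).foldl
      (fun ans i =>
        if (PySem.List.max? (PySem.List.slice nums none (some i)) (fun y => y)).getD 0 <
              PySem.List.pyGetD nums i 0 ∧
            PySem.List.pyGetD nums i 0 <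
              (PySem.List.min? (PySem.List.slice nums (some (i + 1)) none) (fun y => y)).getD 0
        then ans + 2
        else if PySem.List.pyGetD nums (i - 1) 0 < PySem.List.pyGetD nums i 0 ∧
            PySem.List.pyGetD nums i 0 < PySem.List.pyGetD nums (i + 1) 0 then ans + 1
        else ans) ans := by
  subst hb
  intro d
  induction d with
  | zero =>
    intro a ha hbound ans maxv hmv
    rw [PySem.List.pyRange_one_eq_nil (by push_cast at hbound ⊢; omega)]
    simp
  | succ d ih =>
    intro a ha hbound ans maxv hmv
    by_cases hlt : (a : Int) < (nums.length : Int) - 1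
    · rw [PySem.List.pyRange_one_cons hlt]
      simp only [List.foldl_cons]
      have han : a < nums.length := by omega
      have ha1n : a + 1 < nums.length := by omega
      have hc2 : (a : Int) + 1 = ((a + 1 : Nat) : Int) := by push_cast; ring
      have hga : PySem.List.pyGetD nums (a : Int) 0 = nums.getD a 0 :=
        PySem.List.pyGetD_natCast ..
      -- A's minArr lookup = B's slice min
      have hmin : PySem.List.pyGetD M ((a : Int) + 1) 0 =
          (PySem.List.min? (PySem.List.slice nums (some ((a : Int) + 1)) none)
            (fun y => y)).getD 0 := by
        rw [hc2, PySem.List.pyGetD_natCast, hM (a + 1) ha1n, minSlice_eq nums (a + 1) ha1n]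
      -- A's running max = B's slice max
      have hmaxs : (PySem.List.max? (PySem.List.slice nums none (some ((a : Nat) : Int)))
          (fun y => y)).getD 0 = preMax nums a := maxSlice_eq nums a ha (by omega)
      rw [hmin, hmv, ← hmaxs]
      have hmv' : max (PySem.List.pyGetD nums (a : Int) 0)
          ((PySem.List.max? (PySem.List.slice nums none (some ((a : Nat) : Int)))
            (fun y => y)).getD 0) = preMax nums (a + 1) := by
        rw [hmaxs, hga, preMax_succ nums a ha han, max_comm]
      have key := ih (a + 1) (by omega) (by push_cast at hbound ⊢; omega)
        (if (PySem.List.max? (PySem.List.slice nums none (some (a : Int))) (fun y => y)).getD 0 <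
              PySem.List.pyGetD nums (a : Int) 0 ∧
            PySem.List.pyGetD nums (a : Int) 0 <
              (PySem.List.min? (PySem.List.slice nums (some ((a : Int) + 1)) none)
                (fun y => y)).getD 0 then ans + 2
          else if PySem.List.pyGetD nums ((a : Int) - 1) 0 < PySem.List.pyGetD nums (a : Int) 0 ∧
              PySem.List.pyGetD nums (a : Int) 0 < PySem.List.pyGetD nums ((a : Int) + 1) 0
            then ans + 1
          else ans)
        (max (PySem.List.pyGetD nums (a : Int) 0)
          ((PySem.List.max? (PySem.List.slice nums none (some ((a : Nat) : Int)))
            (fun y => y)).getD 0)) hmv'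
      rw [← hc2] at key
      exact key
    · rw [PySem.List.pyRange_one_eq_nil (by omega)]
      simp

-- ===== VERDICT (by name: the statement is the Claim_ definition above) =====
theorem sumOfBeauties_spec : Claim_equal_sumOfBeauties := by
  intro nums hdom hpre
  unfold Spec_sumOfBeauties
  obtain ⟨x, t, rfl⟩ : ∃ x t, nums = x :: t := by
    cases nums with
    | nil => exact absurd rfl hpre
    | cons a b => exact ⟨a, b, rfl⟩
  have hne : x :: t ≠ [] := by simp
  set nums := x :: t with hnums
  simp only [sumOfBeauties, sumOfBeauties_alt]
  set M : List Int := (List.range nums.length).map (sufMin nums) with hMdef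
  have hMlen : M.length = nums.length := by rw [hMdef]; simp
  have hMget : ∀ j, j < nums.length → M.getD j 0 = sufMin nums j := by
    intro j hj
    rw [hMdef, List.getD_eq_getElem _ 0 (by simpa using hj)]
    simp
  have hMrec : ∀ j, j + 1 < nums.length →
      M.getD j 0 = min (nums.getD j 0) (M.getD (j + 1) 0) := by
    intro j hj
    rw [hMget j (by omega), hMget (j + 1) hj, sufMin_rec nums j hj]
  have e7 : PySem.List.pyGetD nums (-1) 0 = nums.getLast hne :=
    PySem.List.pyGetD_neg_one _ _ hne
  have e8 : PySem.List.pyRepeat [(0 : Int)] ((nums.length : Nat) : Int)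
      = List.replicate nums.length (0 : Int) := by
    rw [PySem.List.pyRepeat_singleton, Int.toNat_natCast]
  have e9 : PySem.List.pySetD (List.replicate nums.length (0 : Int)) (-1) (nums.getLast hne)
      = (List.replicate nums.length (0 : Int)).set (nums.length - 1) (nums.getLast hne) := by
    rw [pySetD_neg_one _ _ (by simp [hnums]), List.length_replicate]
  have hcast : ((nums.length : Int)) - 1 = ((nums.length - 1 : Nat) : Int) := by
    simp only [hnums, List.length_cons]; omega
  have e10 : ((PySem.List.pyRange 0 (((nums.length - 1 : Nat) : Int)) 1).reverse).foldl
      (fun m i => PySem.List.pySetD m i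
        (min (PySem.List.pyGetD nums i 0) (PySem.List.pyGetD m (i + 1) 0)))
      ((List.replicate nums.length (0 : Int)).set (nums.length - 1) (nums.getLast hne))
      = M := by
    apply minArr_loop nums M hMrec hMlen (nums.length - 1) (le_refl _) _ (by simp)
    intro j hj1 hj2
    have hj : j = nums.length - 1 := by omega
    subst hj
    rw [getD_set_self _ _ _ (by simp [hnums]), hMget _ hj2, sufMin_last nums hne]
  simp only [e7, e8, e9, hcast, e10]
  have key := main_loop nums M hMget (((nums.length - 1 : Nat) : Int)) (by rw [hcast])
    ((nums.length - 1 : Nat)) 1 (le_refl 1) (by push_cast; omega)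
    0 (PySem.List.pyGetD nums 0 0)
    (by rw [hnums, PySem.List.pyGetD_zero_cons, preMax_one])
  rw [Nat.cast_one] at key
  exact key
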